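-- pv_equiv track=rewrite | github.com/mitaliborad/Telegram_Bot_Tool | database/file_models.py | _find_best_file_id
-- ===== SOURCE A (Python) =====
-- from typing import Optional, Dict, Any, List, Tuple
--
-- def _find_best_file_id(locations: list, primary_chat_id: str) -> Optional[str]:
--     """
--     Helper to find the file_id from the primary chat, with a fallback.
--     This version correctly parses the flattened data structure saved by _parse_send_results.
--     """
--     primary_file_id = None
--     fallback_file_id = None
--
--     if not isinstance(locations, list):
--         return None
--
--     for loc in locations:
--         if not isinstance(loc, dict):
--             continue
--         file_id = loc.get('file_id')
--
--         if file_id: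
--             if str(loc.get('chat_id')) == str(primary_chat_id):
--                 primary_file_id = file_id
--                 break
--             if not fallback_file_id:
--                 fallback_file_id = file_id
--
--     return primary_file_id or fallback_file_id
-- ===== SOURCE B (Python) =====
-- from typing import Optional
--
--
-- def _find_best_file_id(locations: list, primary_chat_id: str) -> Optional[str]:
--     """Two independent predicated scans: first file_id from the primary chat,
--     else first file_id from any chat."""
--     if not isinstance(locations, list):
--         return None
--     primary = next((loc.get('file_id') for loc in locations
--                     if isinstance(loc, dict) and loc.get('file_id')
--                     and str(loc.get('chat_id')) == str(primary_chat_id)), None)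
--     fallback = next((loc.get('file_id') for loc in locations
--                      if isinstance(loc, dict) and loc.get('file_id')), None)
--     return primary or fallback
-- ===== Notes on version B (the rewrite author's own statement) =====
-- stated objective: simpler
-- what changed: Replaces the single interleaved loop with a break and a mutable fallback tracker by two independent first-match scans (primary-chat match, then any match) combined with 'or'.
import Mathlib
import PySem

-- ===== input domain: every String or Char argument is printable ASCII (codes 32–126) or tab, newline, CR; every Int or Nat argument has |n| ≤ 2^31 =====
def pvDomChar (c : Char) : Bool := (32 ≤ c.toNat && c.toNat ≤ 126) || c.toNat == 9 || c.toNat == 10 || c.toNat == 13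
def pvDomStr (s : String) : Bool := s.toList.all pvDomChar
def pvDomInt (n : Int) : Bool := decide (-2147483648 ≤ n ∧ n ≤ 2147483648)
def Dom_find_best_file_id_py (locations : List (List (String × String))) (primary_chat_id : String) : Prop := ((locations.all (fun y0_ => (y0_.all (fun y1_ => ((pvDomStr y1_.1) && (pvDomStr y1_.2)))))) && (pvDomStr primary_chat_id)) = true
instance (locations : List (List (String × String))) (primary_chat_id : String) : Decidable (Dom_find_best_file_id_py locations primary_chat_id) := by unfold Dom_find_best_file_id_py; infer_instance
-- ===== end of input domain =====

-- B replaces A's interleaved loop (break + mutable fallback tracker) by two independent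
-- first-match scans combined with `or`; objective: simpler.


-- shared primitives: dict.get (first match in the association list), Python truthiness of an
-- Optional[str], and str(loc.get('chat_id')) (str(None) = "None")
def pvGet (loc : List (String × String)) (k : String) : Option String :=
  (loc.find? (fun p => p.1 == k)).map Prod.snd

def pvTruthy : Option String → Bool
  | none => false
  | some s => !(s == "")

def pvChatStr (loc : List (String × String)) : String :=
  match pvGet loc "chat_id" with
  | some c => c
  | none => "None"

-- ===== PORT A =====
-- the for-loop with the mutable fallback_file_id; break returns the primary file_id
def find_best_loopA (pid : String) :
    List (List (String × String)) → Option String → Option String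
  | [], fallback => fallback
  | loc :: rest, fallback =>
    let file_id := pvGet loc "file_id"
    if pvTruthy file_id then
      if pvChatStr loc == pid then file_id
      else find_best_loopA pid rest (if pvTruthy fallback then fallback else file_id)
    else find_best_loopA pid rest fallback

def find_best_file_id_py (locations : List (List (String × String))) (primary_chat_id : String) : Option String :=
  find_best_loopA primary_chat_id locations none

-- ===== PORT B =====
def pvPrimaryScan (locations : List (List (String × String))) (pid : String) : Option String :=
  locations.findSome? (fun loc =>
    let fid := pvGet loc "file_id"
    if pvTruthy fid && (pvChatStr loc == pid) then fid else none)

def pvFallbackScan (locations : List (List (String × String))) : Option String :=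
  locations.findSome? (fun loc =>
    let fid := pvGet loc "file_id"
    if pvTruthy fid then fid else none)

def find_best_file_id_py_alt (locations : List (List (String × String))) (primary_chat_id : String) : Option String :=
  match pvPrimaryScan locations primary_chat_id with
  | some p => some p
  | none => pvFallbackScan locations

-- ===== PRECONDITION & SPEC =====
def Spec_find_best_file_id_py (locations : List (List (String × String))) (primary_chat_id : String) (out : Option String) : Prop := out = find_best_file_id_py_alt locations primary_chat_id
instance (locations : List (List (String × String))) (primary_chat_id : String) (out : Option String) : Decidable (Spec_find_best_file_id_py locations primary_chat_id out) := by unfold Spec_find_best_file_id_py; infer_instance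

-- ===== CLAIM (what is proved, stated in full; the proofs are below) =====
def Claim_equal_find_best_file_id_py : Prop := ∀ (locations : List (List (String × String))) (primary_chat_id : String), Dom_find_best_file_id_py locations primary_chat_id → Spec_find_best_file_id_py locations primary_chat_id (find_best_file_id_py locations primary_chat_id)

-- ===== LEMMAS AND PROOFS =====
-- loop invariant: A's loop with fallback state fb returns the first primary match if any,
-- else fb if fb is already truthy, else the first truthy file_id of the remaining list.
theorem loopA_eq (pid : String) (locs : List (List (String × String))) (fb : Option String)
    (hfb : pvTruthy fb = false → fb = none) :
    find_best_loopA pid locs fb =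
      match pvPrimaryScan locs pid with
      | some p => some p
      | none => if pvTruthy fb then fb else pvFallbackScan locs := by
  induction locs generalizing fb with
  | nil =>
    simp only [find_best_loopA, pvPrimaryScan, pvFallbackScan, List.findSome?_nil]
    by_cases h : pvTruthy fb
    · simp [h]
    · simp [h, hfb (by simpa using h)]
  | cons loc rest ih =>
    rcases hf : pvGet loc "file_id" with _ | s
    · -- no file_id: the head contributes to neither scan
      simp [find_best_loopA, hf, pvTruthy, pvPrimaryScan, pvFallbackScan, ih fb hfb]
    · by_cases h1 : pvTruthy (some s)
      · by_cases h2 : pvChatStr loc = pid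
        · -- primary match: A breaks, B's primary scan yields the same file_id
          simp [find_best_loopA, hf, h1, h2, pvPrimaryScan, List.findSome?_cons]
        · -- truthy but not primary: head feeds only the fallback
          rw [show find_best_loopA pid (loc :: rest) fb
              = find_best_loopA pid rest (if pvTruthy fb then fb else some s) by
            simp [find_best_loopA, hf, h1, h2]]
          rw [ih _ (by by_cases h3 : pvTruthy fb <;> simp [h3, h1])]
          have hp : pvPrimaryScan (loc :: rest) pid = pvPrimaryScan rest pid := by
            simp [pvPrimaryScan, List.findSome?_cons, hf, h2]
          have hfbs : pvFallbackScan (loc :: rest) = some s := by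
            simp [pvFallbackScan, List.findSome?_cons, hf, h1]
          rw [hp, hfbs]
          cases pvPrimaryScan rest pid <;> by_cases h3 : pvTruthy fb <;> simp [h3, h1]
      · -- falsy file_id (empty string): skipped by both programs
        have hs : s = "" := by
          simp [pvTruthy] at h1; exact h1
        subst hs
        simp [find_best_loopA, hf, pvTruthy, pvPrimaryScan, pvFallbackScan, ih fb hfb]

-- ===== VERDICT (by name: the statement is the Claim_ definition above) =====
theorem find_best_file_id_py_spec : Claim_equal_find_best_file_id_py := by
  intro locations pid _
  unfold Spec_find_best_file_id_py find_best_file_id_py find_best_file_id_py_alt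
  rw [loopA_eq _ _ _ (fun _ => rfl)]
  cases pvPrimaryScan locations pid <;> simp [pvTruthy]
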